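-- pv_equiv track=rewrite | github.com/granttremel/genomics | scripts/test_correlate_refactor.py | h_bond_analyzer
-- ===== SOURCE A (Python) =====
-- def h_bond_analyzer(shift, seq1_subseq, seq2_subseq, overlap_len):
--     """
--     Example: count potential H-bonds (A-U and G-C pairs).
--     Returns (h_bonds, gc_count, au_count)
--     """
--     h_bonds = 0
--     gc_count = 0
--     au_count = 0
--
--     for s1_base, s2_base in zip(seq1_subseq, seq2_subseq):
--         if (s1_base, s2_base) in [('A', 'U'), ('U', 'A')]:
--             h_bonds += 2  # A-U has 2 H-bonds
--             au_count += 1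
--         elif (s1_base, s2_base) in [('G', 'C'), ('C', 'G')]:
--             h_bonds += 3  # G-C has 3 H-bonds
--             gc_count += 1
--
--     return h_bonds, gc_count, au_count
-- ===== SOURCE B (Python) =====
-- def _positions(s, base):
--     return {i for i, c in enumerate(s) if c == base}
--
--
-- def h_bond_analyzer(shift, seq1_subseq, seq2_subseq, overlap_len):
--     """
--     Inverted-index formulation: instead of walking the zipped pair list, build the
--     set of positions of each relevant base in each sequence and intersect them.
--     A position i pairs base b1 with b2 exactly when i is in positions(seq1, b1) and
--     in positions(seq2, b2) (set intersection also enforces zip's truncation to the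
--     shorter sequence, since i must be a valid index of both). H-bonds come out in
--     closed form as 2*au + 3*gc.
--     """
--     au_count = len(_positions(seq1_subseq, 'A') & _positions(seq2_subseq, 'U')) \
--              + len(_positions(seq1_subseq, 'U') & _positions(seq2_subseq, 'A'))
--     gc_count = len(_positions(seq1_subseq, 'G') & _positions(seq2_subseq, 'C')) \
--              + len(_positions(seq1_subseq, 'C') & _positions(seq2_subseq, 'G'))
--     return 2 * au_count + 3 * gc_count, gc_count, au_count
-- ===== Notes on version B (the rewrite author's own statement) =====
-- stated objective: alternative
-- what changed: Replaces the single branchy pass over zip(seq1,seq2) by an inverted index: per-base position sets for each sequence, pair counts obtained as cardinalities of set intersections (which also enforce zip truncation), and h_bonds derived in closed form as 2*au + 3*gc.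
import Mathlib
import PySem

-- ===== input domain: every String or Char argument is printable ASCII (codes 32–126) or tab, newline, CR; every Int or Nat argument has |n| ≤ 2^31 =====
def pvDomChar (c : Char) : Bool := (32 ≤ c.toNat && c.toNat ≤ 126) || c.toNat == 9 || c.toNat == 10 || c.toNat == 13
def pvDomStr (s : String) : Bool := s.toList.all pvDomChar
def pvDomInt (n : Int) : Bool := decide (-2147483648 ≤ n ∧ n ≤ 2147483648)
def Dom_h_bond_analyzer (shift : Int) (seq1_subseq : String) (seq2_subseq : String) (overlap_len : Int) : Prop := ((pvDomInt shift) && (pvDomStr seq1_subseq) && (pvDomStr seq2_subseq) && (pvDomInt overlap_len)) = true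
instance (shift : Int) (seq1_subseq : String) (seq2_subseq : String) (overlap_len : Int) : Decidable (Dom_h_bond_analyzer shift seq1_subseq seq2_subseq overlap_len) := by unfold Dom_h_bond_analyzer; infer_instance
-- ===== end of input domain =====

-- B replaces A's branchy accumulating pass over the zipped pairs by an inverted index
-- (per-base position sets, intersected per pair type) plus the closed form 2*au + 3*gc;
-- same asymptotic cost, a genuinely different traversal (objective: alternative).

-- ===== PORT A =====
def h_bond_analyzer (shift : Int) (seq1_subseq : String) (seq2_subseq : String) (overlap_len : Int) : Int × Int × Int :=
  -- h_bonds = 0; gc_count = 0; au_count = 0; for s1_base, s2_base in zip(...)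
  let r := (seq1_subseq.toList.zip seq2_subseq.toList).foldl
    (fun (st : Int × Int × Int) p =>
      if [('A', 'U'), ('U', 'A')].contains p then
        (st.1 + 2, st.2.1, st.2.2 + 1)
      else if [('G', 'C'), ('C', 'G')].contains p then
        (st.1 + 3, st.2.1 + 1, st.2.2)
      else st)
    (0, 0, 0)
  r

-- ===== PORT B =====
-- _positions(s, base) = {i for i, c in enumerate(s) if c == base}
def pyPositions (s : String) (base : Char) : PySem.Set Int :=
  PySem.Set.ofList (((PySem.List.enumerate s.toList 0).filter (fun p => p.2 == base)).map (fun p => p.1))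

def h_bond_analyzer_alt (shift : Int) (seq1_subseq : String) (seq2_subseq : String) (overlap_len : Int) : Int × Int × Int :=
  let au_count :=
    PySem.Set.len (PySem.Set.inter (pyPositions seq1_subseq 'A') (pyPositions seq2_subseq 'U'))
    + PySem.Set.len (PySem.Set.inter (pyPositions seq1_subseq 'U') (pyPositions seq2_subseq 'A'))
  let gc_count :=
    PySem.Set.len (PySem.Set.inter (pyPositions seq1_subseq 'G') (pyPositions seq2_subseq 'C'))
    + PySem.Set.len (PySem.Set.inter (pyPositions seq1_subseq 'C') (pyPositions seq2_subseq 'G'))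
  (2 * au_count + 3 * gc_count, gc_count, au_count)

-- ===== PRECONDITION & SPEC =====
def Spec_h_bond_analyzer (shift : Int) (seq1_subseq : String) (seq2_subseq : String) (overlap_len : Int) (out : Int × Int × Int) : Prop := out = h_bond_analyzer_alt shift seq1_subseq seq2_subseq overlap_len
instance (shift : Int) (seq1_subseq : String) (seq2_subseq : String) (overlap_len : Int) (out : Int × Int × Int) : Decidable (Spec_h_bond_analyzer shift seq1_subseq seq2_subseq overlap_len out) := by unfold Spec_h_bond_analyzer; infer_instance

-- ===== CLAIM (what is proved, stated in full; the proofs are below) =====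
def Claim_equal_h_bond_analyzer : Prop := ∀ (shift : Int) (seq1_subseq : String) (seq2_subseq : String) (overlap_len : Int), Dom_h_bond_analyzer shift seq1_subseq seq2_subseq overlap_len → Spec_h_bond_analyzer shift seq1_subseq seq2_subseq overlap_len (h_bond_analyzer shift seq1_subseq seq2_subseq overlap_len)

-- ===== LEMMAS AND PROOFS =====

-- the raw index list behind a position set, with an arbitrary enumeration start
def idxOf (l : List Char) (b : Char) (s : Int) : List Int :=
  ((PySem.List.enumerate l s).filter (fun p => p.2 == b)).map (fun p => p.1)

theorem idxOf_nil (b : Char) (s : Int) : idxOf [] b s = [] := rfl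

theorem idxOf_cons (x : Char) (t : List Char) (b : Char) (s : Int) :
    idxOf (x :: t) b s = (if x = b then [s] else []) ++ idxOf t b (s + 1) := by
  simp only [idxOf, PySem.List.enumerate_cons, List.filter_cons]
  by_cases h : x = b <;> simp [h]

theorem idxOf_pairwise (l : List Char) (b : Char) (s : Int) :
    (idxOf l b s).Pairwise (· < ·) := by
  simp only [idxOf, List.pairwise_map]
  exact (PySem.List.pairwise_lt_enumerate l s).filter _

theorem idxOf_lower (l : List Char) (b : Char) (s : Int) :
    ∀ i ∈ idxOf l b s, s ≤ i := by
  intro i hi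
  simp only [idxOf, List.mem_map, List.mem_filter] at hi
  obtain ⟨p, ⟨hp, _⟩, rfl⟩ := hi
  obtain ⟨k, _, rfl⟩ := (PySem.List.mem_enumerate_iff _ _ _).1 hp
  omega

theorem pyPositions_eq (s : String) (b : Char) :
    pyPositions s b = idxOf s.toList b 0 :=
  PySem.Set.ofList_eq_self_of_nodup _
    ((idxOf_pairwise s.toList b 0).imp (fun h => ne_of_lt h))

-- the cardinality of the intersection of two position lists is the pair count in the zip
theorem inter_idxOf_length (l1 l2 : List Char) (b1 b2 : Char) (s : Int) :
    (PySem.Set.inter (idxOf l1 b1 s) (idxOf l2 b2 s)).length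
      = (l1.zip l2).count (b1, b2) := by
  induction l1 generalizing l2 s with
  | nil => simp [idxOf_nil, PySem.Set.inter]
  | cons x t1 ih =>
    cases l2 with
    | nil => simp [idxOf_nil, PySem.Set.inter]
    | cons y t2 =>
      have hR1 := idxOf_lower t1 b1 (s + 1)
      have hR2 := idxOf_lower t2 b2 (s + 1)
      have hcongr : ∀ i ∈ idxOf t1 b1 (s + 1),
          PySem.Set.contains ((if y = b2 then [s] else []) ++ idxOf t2 b2 (s + 1)) i
            = PySem.Set.contains (idxOf t2 b2 (s + 1)) i := by
        intro i hi
        have : s + 1 ≤ i := hR1 i hi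
        by_cases h : y = b2 <;>
          simp [h] <;> omega
      simp only [PySem.Set.inter, idxOf_cons, List.zip_cons_cons, List.count_cons,
        List.filter_append, List.length_append]
      rw [List.filter_congr hcongr]
      have hIH := ih t2 (s + 1)
      simp only [PySem.Set.inter] at hIH
      rw [hIH]
      by_cases h1 : x = b1 <;> by_cases h2 : y = b2 <;>
        · have hs : s ∉ idxOf t2 b2 (s + 1) := fun h => by have := hR2 s h; omega
          simp [h1, h2, hs, Prod.ext_iff]
          try omega

-- A's loop, started from an arbitrary accumulator, equals the accumulator plus
-- the closed-form contributions of the four recognised pairs.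
theorem hba_foldl_eq (l : List (Char × Char)) (a g u : Int) :
    l.foldl
      (fun (st : Int × Int × Int) p =>
        if [('A', 'U'), ('U', 'A')].contains p then
          (st.1 + 2, st.2.1, st.2.2 + 1)
        else if [('G', 'C'), ('C', 'G')].contains p then
          (st.1 + 3, st.2.1 + 1, st.2.2)
        else st)
      (a, g, u)
    = (a + 2 * ((l.count ('A', 'U') : Int) + (l.count ('U', 'A') : Int))
         + 3 * ((l.count ('G', 'C') : Int) + (l.count ('C', 'G') : Int)),
       g + ((l.count ('G', 'C') : Int) + (l.count ('C', 'G') : Int)),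
       u + ((l.count ('A', 'U') : Int) + (l.count ('U', 'A') : Int))) := by
  induction l generalizing a g u with
  | nil => simp
  | cons p t ih =>
    rw [List.foldl_cons]
    by_cases hAU : p = ('A', 'U') ∨ p = ('U', 'A')
    · rcases hAU with h | h <;> subst h <;>
        · rw [if_pos (by decide), ih]
          simp [Prod.ext_iff]
          omega
    · by_cases hGC : p = ('G', 'C') ∨ p = ('C', 'G')
      · rcases hGC with h | h <;> subst h <;>
          · rw [if_neg (by decide), if_pos (by decide), ih]
            simp [Prod.ext_iff]
            omega
      · rw [if_neg (by simp [List.contains_eq_mem]; tauto),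
            if_neg (by simp [List.contains_eq_mem]; tauto), ih]
        have e1 : ¬ p = ('A', 'U') := fun h => hAU (Or.inl h)
        have e2 : ¬ p = ('U', 'A') := fun h => hAU (Or.inr h)
        have e3 : ¬ p = ('G', 'C') := fun h => hGC (Or.inl h)
        have e4 : ¬ p = ('C', 'G') := fun h => hGC (Or.inr h)
        simp [e1, e2, e3, e4]

-- ===== VERDICT (by name: the statement is the Claim_ definition above) =====
theorem h_bond_analyzer_spec : Claim_equal_h_bond_analyzer := by
  intro shift s1 s2 ov _
  show _ = _
  simp only [h_bond_analyzer, h_bond_analyzer_alt, pyPositions_eq, PySem.Set.len,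
    inter_idxOf_length]
  rw [hba_foldl_eq]
  simp
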